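-- pv_equiv track=rewrite | github.com/hayounSong/Song_Algorithm | Baekjoon1003.py | zero_fibo
-- ===== SOURCE A (Python) =====
-- dep={}
--
-- def zero_fibo(A):
--     zerocount=0
--     if(A==0):
--         zerocount=zerocount+1
--         return zerocount
--     elif(A==1):
--         return 0
--     elif(A in dep):
--         zerocount=zerocount+dep[A]
--
--         return zerocount
--     else:
--         zerocount=zerocount+zero_fibo(A-1)+zero_fibo(A-2)
--         dep[A]=zerocount
--         return zerocount
-- ===== SOURCE B (Python) =====
-- def _fib(n):
--     # fast doubling: returns (F(n), F(n+1)) for standard Fibonacci F(0)=0, F(1)=1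
--     if n == 0:
--         return (0, 1)
--     a, b = _fib(n // 2)
--     c = a * (2 * b - a)
--     d = a * a + b * b
--     if n % 2 == 0:
--         return (c, d)
--     return (d, c + d)
--
-- def zero_fibo(A):
--     if A == 0:
--         return 1
--     return _fib(A - 1)[0]
-- ===== Notes on version B (the rewrite author's own statement) =====
-- stated objective: faster
-- what changed: Replaced the memoized two-branch Fibonacci recursion (linear number of additions plus a dict) by a closed-form fast-doubling Fibonacci computation, keeping the special zero base case.
import Mathlib
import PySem

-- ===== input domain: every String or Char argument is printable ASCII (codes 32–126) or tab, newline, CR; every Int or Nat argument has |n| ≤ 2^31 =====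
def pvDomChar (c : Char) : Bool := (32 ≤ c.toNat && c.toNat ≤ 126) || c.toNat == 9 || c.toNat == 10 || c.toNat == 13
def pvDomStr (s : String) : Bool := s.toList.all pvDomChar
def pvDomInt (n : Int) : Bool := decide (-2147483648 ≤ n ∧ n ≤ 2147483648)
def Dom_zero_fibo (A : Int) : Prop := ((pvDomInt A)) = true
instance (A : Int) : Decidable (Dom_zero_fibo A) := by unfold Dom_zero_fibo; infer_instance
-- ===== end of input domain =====

-- B replaces A's memoized two-branch recursion by fast-doubling Fibonacci (logarithmic
-- number of arithmetic operations); equal return values proved for all A ≥ 0.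

-- ===== PORT A =====
-- A's recursion, with the module-global memo dict `dep` threaded through the calls
-- (it starts empty at the top-level call; `A in dep` / `dep[A]` is ported as one get?).
def zeroFiboGo : Nat → PySem.Dict Int Int → Int × PySem.Dict Int Int
  | 0, d => (1, d)
  | 1, d => (0, d)
  | (n+2), d =>
    match d.get? ((n + 2 : Nat) : Int) with
    | some v => (v, d)
    | none =>
      let r1 := zeroFiboGo (n+1) d
      let r2 := zeroFiboGo n r1.2
      let z := r1.1 + r2.1
      (z, r2.2.insert ((n + 2 : Nat) : Int) z)

def zero_fibo (A : Int) : Int := (zeroFiboGo A.toNat PySem.Dict.empty).1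

-- ===== PORT B =====
-- fast doubling: fibPair n = (F n, F (n+1))
def fibPair : Nat → Int × Int
  | 0 => (0, 1)
  | (n+1) =>
    let p := fibPair ((n+1)/2)
    let a := p.1
    let b := p.2
    let c := a * (2*b - a)
    let d := a*a + b*b
    if (n+1) % 2 = 0 then (c, d) else (d, c + d)
decreasing_by omega

def zero_fibo_alt (A : Int) : Int := if A = 0 then 1 else (fibPair (A - 1).toNat).1

-- ===== PRECONDITION & SPEC =====
-- A recurses with no base case below 0, so any A < 0 raises RecursionError: excluded.
def Pre_zero_fibo (A : Int) : Prop := 0 ≤ A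
instance (A : Int) : Decidable (Pre_zero_fibo A) := by unfold Pre_zero_fibo; infer_instance
def pvWitness_zero_fibo : Int := (5)

def Spec_zero_fibo (A : Int) (out : Int) : Prop := out = zero_fibo_alt A
instance (A : Int) (out : Int) : Decidable (Spec_zero_fibo A out) := by unfold Spec_zero_fibo; infer_instance

-- ===== CLAIM (what is proved, stated in full; the proofs are below) =====
def Claim_equal_zero_fibo : Prop := ∀ (A : Int), Dom_zero_fibo A → Pre_zero_fibo A → Spec_zero_fibo A (zero_fibo A)

-- ===== LEMMAS AND PROOFS =====

-- the value A's recursion computes: Z 0 = 1, Z 1 = 0, Z (n+2) = Z (n+1) + Z n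
def Zc : Nat → Int
  | 0 => 1
  | 1 => 0
  | (n+2) => Zc (n+1) + Zc n

-- invariant of the memo dict: every stored value is correct
def InvDep (d : PySem.Dict Int Int) : Prop :=
  ∀ (m : Nat) (v : Int), d.get? (m : Int) = some v → v = Zc m

theorem zeroFiboGo_correct (n : Nat) :
    ∀ d, InvDep d → (zeroFiboGo n d).1 = Zc n ∧ InvDep (zeroFiboGo n d).2 := by
  induction n using Nat.strong_induction_on with
  | _ n ih =>
    intro d hd
    match n with
    | 0 => exact ⟨rfl, hd⟩
    | 1 => exact ⟨rfl, hd⟩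
    | (n+2) =>
      rw [zeroFiboGo]
      cases hget : d.get? ((n + 2 : Nat) : Int) with
      | some v =>
        exact ⟨(hd (n+2) v hget).symm ▸ rfl, hd⟩
      | none =>
        obtain ⟨h1, hI1⟩ := ih (n+1) (by omega) d hd
        obtain ⟨h2, hI2⟩ := ih n (by omega) (zeroFiboGo (n+1) d).2 hI1
        refine ⟨by simp [h1, h2, Zc], ?_⟩
        intro m v hv
        rw [PySem.Dict.get?_insert] at hv
        split at hv
        · rename_i heq
          have hm : m = n + 2 := by exact_mod_cast heq
          subst hm
          simp at hv
          simp [← hv, h1, h2, Zc]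
        · exact hI2 m v hv

theorem Zc_succ_eq_fib : ∀ n : Nat, Zc (n+1) = (Nat.fib n : Int) := by
  intro n
  induction n using Nat.strong_induction_on with
  | _ n ih =>
    match n with
    | 0 => rfl
    | 1 => rfl
    | (n+2) =>
      have e1 := ih (n+1) (by omega)
      have e2 := ih n (by omega)
      show Zc (n+2) + Zc (n+1) = _
      rw [e1, e2, Nat.fib_add_two]
      push_cast
      ring

theorem fibPair_eq (n : Nat) : fibPair n = ((Nat.fib n : Int), (Nat.fib (n+1) : Int)) := by
  induction n using Nat.strong_induction_on with
  | _ n ih =>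
    match n with
    | 0 => simp [fibPair]
    | (n+1) =>
      have hih := ih ((n+1)/2) (by omega)
      rw [fibPair, hih]
      by_cases hpar : (n+1) % 2 = 0
      · have h2m : n + 1 = 2 * ((n+1)/2) := by omega
        set m := (n+1)/2 with hm
        simp only [hpar, if_true]
        have hfe : Nat.fib m ≤ 2 * Nat.fib (m+1) :=
          le_trans (Nat.fib_le_fib_succ) (by omega)
        rw [Prod.mk.injEq]
        refine ⟨?_, ?_⟩
        · show (Nat.fib m : Int) * (2 * (Nat.fib (m+1) : Int) - (Nat.fib m : Int)) = _
          rw [h2m, Nat.fib_two_mul]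
          push_cast [hfe]
          ring
        · show (Nat.fib m : Int) * (Nat.fib m : Int) + (Nat.fib (m+1) : Int) * (Nat.fib (m+1) : Int) = _
          rw [h2m, Nat.fib_two_mul_add_one]
          push_cast
          ring
      · have h2m : n + 1 = 2 * ((n+1)/2) + 1 := by omega
        set m := (n+1)/2 with hm
        simp only [hpar, if_false]
        rw [Prod.mk.injEq]
        refine ⟨?_, ?_⟩
        · show (Nat.fib m : Int) * (Nat.fib m : Int) + (Nat.fib (m+1) : Int) * (Nat.fib (m+1) : Int) = _
          rw [h2m, Nat.fib_two_mul_add_one]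
          push_cast
          ring
        · show (Nat.fib m : Int) * (2 * (Nat.fib (m+1) : Int) - (Nat.fib m : Int)) +
               ((Nat.fib m : Int) * (Nat.fib m : Int) + (Nat.fib (m+1) : Int) * (Nat.fib (m+1) : Int)) = _
          have hfe : Nat.fib m ≤ 2 * Nat.fib (m+1) :=
            le_trans (Nat.fib_le_fib_succ) (by omega)
          rw [h2m, show 2 * m + 1 + 1 = (2 * m) + 2 from rfl, Nat.fib_add_two,
              Nat.fib_two_mul, Nat.fib_two_mul_add_one]
          push_cast [hfe]
          ring

-- ===== VERDICT (by name: the statement is the Claim_ definition above) =====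
theorem zero_fibo_spec : Claim_equal_zero_fibo := by
  intro A _ hpre
  unfold Spec_zero_fibo zero_fibo zero_fibo_alt
  have hempty : InvDep PySem.Dict.empty := by
    intro m v hv
    simp [PySem.Dict.get?_empty] at hv
  rw [(zeroFiboGo_correct A.toNat PySem.Dict.empty hempty).1]
  by_cases hA : A = 0
  · subst hA; rfl
  · have hpos : 0 < A := lt_of_le_of_ne hpre (Ne.symm hA)
    simp only [hA, if_false]
    have hn : A.toNat = (A - 1).toNat + 1 := by omega
    rw [hn, Zc_succ_eq_fib, fibPair_eq]
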